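-- pv_equiv track=rewrite | github.com/hsh814/Baekjoon-algorithm | competition/dd.py | bench_num
-- ===== SOURCE A (Python) =====
-- div: int = (10 ** 9 + 7)
--
-- def bench_sum(benchs: list, n: int, start: int) -> list:
--   num: int = 0
--   multiple: int = start * benchs[n - 1]
--   save = multiple
--   if len(benchs) == n:
--     return [save, multiple]
--   for i in range(len(benchs) - n):
--     num += multiple
--     multiple //= benchs[i]
--     multiple *= benchs[n + i]
--   num += multiple
--   return [save, num % div]
--
-- def bench_num(benchs: list, n: int) -> int:
--   num = 0
--   save = 1
--   for i in range(1, n):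
--     result: list = bench_sum(benchs, i, save)
--     num += result[1]
--     save = result[0]
--   return num
-- ===== SOURCE B (Python) =====
-- div: int = (10 ** 9 + 7)
--
-- def bench_num(benchs: list, n: int) -> int:
--   # DP on window length: prods[j] = product of benchs[j:j+i] mod div.
--   # No bignum growth and no division, O(n*len) small-int ops.
--   m = len(benchs)
--   total = 0
--   prods = [1] * (m + 1)
--   for i in range(1, n):
--     prods = [(prods[j] * benchs[j + i - 1]) % div for j in range(m - i + 1)]
--     total += sum(prods) % div
--   return total
-- ===== Notes on version B (the rewrite author's own statement) =====
-- stated objective: faster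
-- what changed: A slides each window product as an exact bignum using integer division by the outgoing element; B keeps a per-length DP table of window products reduced mod 10^9+7 (prods[j] = prods[j]*benchs[j+i-1] % div), so there is no division and no bignum growth.
-- intended difference: When n = len(benchs)+1 and the full-list product is negative or >= 10^9+7, A's early return for the full-length window skips the mod reduction it applies to every other window length and adds the raw product; B reduces that term mod 10^9+7 like all others, which is the intended value. — e.g. on bench_num([-5, 3, 4], 4): A returns 999999946, B returns 1999999953
import Mathlib
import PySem

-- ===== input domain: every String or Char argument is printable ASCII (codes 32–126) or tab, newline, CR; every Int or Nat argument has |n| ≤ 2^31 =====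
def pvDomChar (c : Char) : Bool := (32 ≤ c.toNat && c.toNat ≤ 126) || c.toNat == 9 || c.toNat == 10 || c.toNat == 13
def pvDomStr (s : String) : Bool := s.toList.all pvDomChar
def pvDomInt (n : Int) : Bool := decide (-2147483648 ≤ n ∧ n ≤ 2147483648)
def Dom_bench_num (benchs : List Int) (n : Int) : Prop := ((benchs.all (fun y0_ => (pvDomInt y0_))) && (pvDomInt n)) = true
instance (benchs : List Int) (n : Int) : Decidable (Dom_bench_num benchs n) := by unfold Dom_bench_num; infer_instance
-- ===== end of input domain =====

-- B replaces A's sliding-window bignum product (with exact integer division) by a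
-- per-length DP table of window products kept reduced mod 10^9+7: no division, no bignum growth.

-- ===== PORT A =====
def pvDiv : Int := 10 ^ 9 + 7

def benchSum (benchs : List Int) (n : Int) (start : Int) : List Int :=
  let num : Int := 0
  let multiple : Int := start * PySem.List.pyGetD benchs (n - 1) 0
  let save : Int := multiple
  if (benchs.length : Int) = n then [save, multiple] else
  let s := (PySem.List.pyRange 0 ((benchs.length : Int) - n) 1).foldl
    (fun (s : Int × Int) i =>
      (s.1 + s.2,
       PySem.Int.floordiv s.2 (PySem.List.pyGetD benchs i 0) * PySem.List.pyGetD benchs (n + i) 0))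
    (num, multiple)
  [save, PySem.Int.mod (s.1 + s.2) pvDiv]

def bench_num (benchs : List Int) (n : Int) : Int :=
  ((PySem.List.pyRange 1 n 1).foldl
    (fun (s : Int × Int) i =>
      let result := benchSum benchs i s.2
      (s.1 + PySem.List.pyGetD result 1 0, PySem.List.pyGetD result 0 0))
    (0, 1)).1

-- ===== PORT B =====
def bench_num_alt (benchs : List Int) (n : Int) : Int :=
  ((PySem.List.pyRange 1 n 1).foldl
    (fun (s : Int × List Int) i =>
      let prods := (PySem.List.pyRange 0 ((benchs.length : Int) - i + 1) 1).map
        (fun j => PySem.Int.mod (PySem.List.pyGetD s.2 j 0 * PySem.List.pyGetD benchs (j + i - 1) 0) pvDiv)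
      (s.1 + PySem.Int.mod prods.sum pvDiv, prods))
    (0, List.replicate (benchs.length + 1) 1)).1

-- ===== PRECONDITION & SPEC =====
-- A raises IndexError when n ≥ 2 and n > len+1, and ZeroDivisionError when n ≥ 2 and a zero
-- occurs among all but the last element; Pre_ excludes exactly those raising inputs.
def Pre_bench_num (benchs : List Int) (n : Int) : Prop :=
  n ≤ 1 ∨ (n ≤ (benchs.length : Int) + 1 ∧ ∀ x ∈ benchs.dropLast, x ≠ 0)
instance (benchs : List Int) (n : Int) : Decidable (Pre_bench_num benchs n) := by
  unfold Pre_bench_num; infer_instance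
def pvWitness_bench_num : List Int × Int := ([2, 3, 4], 3)

-- On n = len+1 (window length = whole list) with the full product negative or ≥ 10^9+7, A adds the
-- full product WITHOUT the mod reduction it applies to every other length (an accidental early
-- return), while B adds it reduced mod 10^9+7 like every other term, which is the intended value.
def D_bench_num (benchs : List Int) (n : Int) : Prop :=
  n = (benchs.length : Int) + 1 ∧ 1 ≤ benchs.length ∧
    (benchs.prod < 0 ∨ 1000000007 ≤ benchs.prod)
instance (benchs : List Int) (n : Int) : Decidable (D_bench_num benchs n) := by
  unfold D_bench_num; infer_instance

def Spec_bench_num (benchs : List Int) (n : Int) (out : Int) : Prop :=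
  ¬ D_bench_num benchs n → out = bench_num_alt benchs n
instance (benchs : List Int) (n : Int) (out : Int) : Decidable (Spec_bench_num benchs n out) := by
  unfold Spec_bench_num; infer_instance

def pvDiffWitness_bench_num : List Int × Int := ([-5, 3, 4], 4)
def pvDiffWitnessOut_bench_num : Int × Int := (999999946, 1999999953)

-- ===== CLAIM (what is proved, stated in full; the proofs are below) =====
def Claim_unchanged_bench_num : Prop := ∀ (benchs : List Int) (n : Int), Dom_bench_num benchs n → Pre_bench_num benchs n → Spec_bench_num benchs n (bench_num benchs n)
def Claim_changed_bench_num : Prop := Dom_bench_num (pvDiffWitness_bench_num.1) (pvDiffWitness_bench_num.2) ∧ Pre_bench_num (pvDiffWitness_bench_num.1) (pvDiffWitness_bench_num.2) ∧ D_bench_num (pvDiffWitness_bench_num.1) (pvDiffWitness_bench_num.2) ∧ bench_num (pvDiffWitness_bench_num.1) (pvDiffWitness_bench_num.2) = pvDiffWitnessOut_bench_num.1 ∧ bench_num_alt (pvDiffWitness_bench_num.1) (pvDiffWitness_bench_num.2) = pvDiffWitnessOut_bench_num.2 ∧ pvDiffWitnessOut_bench_num.1 ≠ pvDiffWitnessO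ut_bench_num.2
def Claim_exact_bench_num : Prop := ∀ (benchs : List Int) (n : Int), Dom_bench_num benchs n → Pre_bench_num benchs n → D_bench_num benchs n → bench_num benchs n ≠ bench_num_alt benchs n

-- ===== LEMMAS AND PROOFS =====

-- window machinery (proof-only helpers)
def pvGet (l : List Int) (j : Nat) : Int := l.getD j 0
def pvW (l : List Int) (i j : Nat) : Int := ((List.range i).map (fun t => pvGet l (j + t))).prod
def pvS (l : List Int) (i : Nat) : Int := ((List.range (l.length - i + 1)).map (fun j => pvW l i j)).sum
def pvTermB (l : List Int) (i : Nat) : Int := pvS l i % pvDiv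
def pvTermA (l : List Int) (i : Nat) : Int := if l.length = i then pvW l i 0 else pvTermB l i
def pvSumA (l : List Int) (N : Nat) : Int := ((List.range N).map (fun t => pvTermA l (t + 1))).sum
def pvSumB (l : List Int) (N : Nat) : Int := ((List.range N).map (fun t => pvTermB l (t + 1))).sum

theorem pvDiv_pos : (0 : Int) < pvDiv := by norm_num [pvDiv]

theorem pvW_succ_right (l : List Int) (i j : Nat) :
    pvW l (i + 1) j = pvW l i j * pvGet l (j + i) := by
  simp [pvW, List.range_succ]

theorem pvW_succ_left (l : List Int) (i j : Nat) :
    pvW l (i + 1) j = pvGet l j * pvW l i (j + 1) := by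
  simp only [pvW, List.range_succ_eq_map, List.map_cons, List.map_map, List.prod_cons, add_zero]
  congr 1
  apply congrArg
  apply List.map_congr_left
  intro t _
  simp only [Function.comp_apply]
  congr 1
  omega

theorem pvW_full (l : List Int) : pvW l l.length 0 = l.prod := by
  unfold pvW
  congr 1
  apply List.ext_getElem
  · simp
  · intro i h1 h2
    simp at h1 ⊢
    simp [pvGet, List.getD_eq_getElem?_getD, h1]

theorem pv_mul_emod_left (a b d : Int) : (a % d * b) % d = (a * b) % d := by
  conv_rhs => rw [Int.mul_emod]
  rw [Int.mul_emod, Int.emod_emod_of_dvd _ dvd_rfl]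

theorem pv_sum_map_emod (d : Int) (xs : List Int) :
    (xs.map (fun x => x % d)).sum % d = xs.sum % d := by
  induction xs with
  | nil => rfl
  | cons x t ih =>
    simp only [List.map_cons, List.sum_cons]
    rw [Int.add_emod, ih, Int.emod_emod_of_dvd _ dvd_rfl, ← Int.add_emod]

theorem pv_sum_map_emod' (d : Int) (f : Nat → Int) (n : Nat) :
    ((List.range n).map (fun j => f j % d)).sum % d = ((List.range n).map f).sum % d := by
  rw [show (fun j => f j % d) = (fun x => x % d) ∘ f from rfl, ← List.map_map, pv_sum_map_emod]

-- A's inner loop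
theorem benchSum_spec (l : List Int) (k : Nat) (hk : k + 1 ≤ l.length)
    (hz : ∀ j, j < l.length - 1 → pvGet l j ≠ 0) :
    benchSum l ((k : Int) + 1) (pvW l k 0) = [pvW l (k + 1) 0, pvTermA l (k + 1)] := by
  have hget : PySem.List.pyGetD l ((k : Int) + 1 - 1) 0 = pvGet l k := by
    have : ((k : Int) + 1 - 1) = (k : Nat) := by omega
    rw [this, PySem.List.pyGetD_natCast]; rfl
  have hmul : pvW l k 0 * pvGet l k = pvW l (k + 1) 0 := by
    rw [pvW_succ_right]; simp
  by_cases hlen : l.length = k + 1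
  · unfold benchSum
    simp only [hget, hmul]
    rw [if_pos (by exact_mod_cast congrArg (Nat.cast : Nat → Int) hlen)]
    unfold pvTermA
    rw [if_pos hlen]
  · -- loop case: l.length > k + 1
    have hlt : k + 1 < l.length := by omega
    set L : Nat := l.length - (k + 1) with hL
    have hrange : ((l.length : Int) - ((k : Int) + 1)) = (L : Int) := by
      simp [hL]; omega
    -- loop invariant
    have inv : ∀ m : Nat, m ≤ L →
        (PySem.List.pyRange 0 (m : Int) 1).foldl
          (fun (s : Int × Int) i =>
            (s.1 + s.2,
             PySem.Int.floordiv s.2 (PySem.List.pyGetD l i 0) * PySem.List.pyGetD l ((k : Int) + 1 + i) 0))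
          (0, pvW l (k + 1) 0)
        = (((List.range m).map (fun t => pvW l (k + 1) t)).sum, pvW l (k + 1) m) := by
      intro m hm
      induction m with
      | zero => rw [PySem.List.pyRange_one_eq_nil (by omega)]; simp
      | succ m ih =>
        have hm' : m ≤ L := by omega
        rw [show ((↑(m + 1) : Int)) = (m : Int) + 1 by push_cast; ring,
            PySem.List.pyRange_one_succ_right (by omega), List.foldl_append, ih hm']
        simp only [List.foldl_cons, List.foldl_nil]
        rw [Prod.mk.injEq]
        constructor
        · rw [List.range_succ]; simp
        · -- the sliding step
          have hmlen : m < l.length - 1 := by omega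
          have hz' := hz m hmlen
          have e1 : PySem.List.pyGetD l (m : Int) 0 = pvGet l m := by
            rw [PySem.List.pyGetD_natCast]; rfl
          have e2 : PySem.List.pyGetD l ((k : Int) + 1 + (m : Int)) 0 = pvGet l (k + 1 + m) := by
            rw [show ((k : Int) + 1 + (m : Int)) = ((k + 1 + m : Nat) : Int) by push_cast; ring,
                PySem.List.pyGetD_natCast]; rfl
          rw [e1, e2, pvW_succ_left l k m]
          have : PySem.Int.floordiv (pvGet l m * pvW l k (m + 1)) (pvGet l m) = pvW l k (m + 1) := by
            simp only [PySem.Int.floordiv]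
            exact Int.mul_fdiv_cancel_left _ hz'
          rw [this, pvW_succ_right l k (m + 1), show m + 1 + k = k + 1 + m by omega]
    unfold benchSum
    simp only [hget, hmul]
    rw [if_neg (by intro h; exact hlen (by exact_mod_cast h)), hrange, inv L le_rfl]
    unfold pvTermA
    rw [if_neg hlen]
    unfold pvTermB pvS
    have hLL : l.length - (k + 1) + 1 = L + 1 := by omega
    rw [hLL, List.range_succ]
    simp [PySem.Int.mod_eq_emod_of_pos pvDiv_pos]

-- A's outer loop
theorem bench_num_outer (l : List Int)
    (hz : ∀ j, j < l.length - 1 → pvGet l j ≠ 0) :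
    ∀ N : Nat, N ≤ l.length →
    (PySem.List.pyRange 1 ((N : Int) + 1) 1).foldl
      (fun (s : Int × Int) i =>
        let result := benchSum l i s.2
        (s.1 + PySem.List.pyGetD result 1 0, PySem.List.pyGetD result 0 0))
      (0, 1)
    = (pvSumA l N, pvW l N 0) := by
  intro N
  induction N with
  | zero => intro _; rw [PySem.List.pyRange_one_eq_nil (by omega)]; simp [pvSumA, pvW]
  | succ N ih =>
    intro hN
    rw [show ((↑(N + 1) : Int) + 1) = ((N : Int) + 1) + 1 by push_cast; ring,
        PySem.List.pyRange_one_succ_right (by omega), List.foldl_append, ih (by omega)]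
    simp only [List.foldl_cons, List.foldl_nil]
    rw [benchSum_spec l N hN hz]
    rw [Prod.mk.injEq]
    constructor
    · simp only [pvSumA, List.range_succ, List.map_append, List.sum_append]
      simp [PySem.List.pyGetD]
    · simp [PySem.List.pyGetD]

-- B's outer loop
theorem bench_num_alt_outer (l : List Int) :
    ∀ N : Nat, N ≤ l.length →
    (PySem.List.pyRange 1 ((N : Int) + 1) 1).foldl
      (fun (s : Int × List Int) i =>
        let prods := (PySem.List.pyRange 0 ((l.length : Int) - i + 1) 1).map
          (fun j => PySem.Int.mod (PySem.List.pyGetD s.2 j 0 * PySem.List.pyGetD l (j + i - 1) 0) pvDiv)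
        (s.1 + PySem.Int.mod prods.sum pvDiv, prods))
      (0, List.replicate (l.length + 1) 1)
    = (pvSumB l N, (List.range (l.length - N + 1)).map (fun j => pvW l N j % pvDiv)) := by
  intro N
  induction N with
  | zero =>
    intro _
    rw [PySem.List.pyRange_one_eq_nil (by omega)]
    simp only [List.foldl_nil, pvSumB, List.range_zero, List.map_nil, List.sum_nil, Nat.sub_zero]
    rw [Prod.mk.injEq]
    constructor
    · rfl
    · have h1 : ∀ j : Nat, pvW l 0 j % pvDiv = 1 := by
        intro j; simp [pvW]; decide
      simp only [h1]
      exact (List.eq_replicate_iff.mpr ⟨by simp, by intro b hb; simp at hb; omega⟩).symm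
  | succ N ih =>
    intro hN
    rw [show ((↑(N + 1) : Int) + 1) = ((N : Int) + 1) + 1 by push_cast; ring,
        PySem.List.pyRange_one_succ_right (by omega), List.foldl_append, ih (by omega)]
    simp only [List.foldl_cons, List.foldl_nil]
    have hcnt : ((l.length : Int) - ((N : Int) + 1) + 1) = ((l.length - N - 1 + 1 : Nat) : Int) := by
      omega
    have hprods :
        (PySem.List.pyRange 0 ((l.length : Int) - ((N : Int) + 1) + 1) 1).map
          (fun j => PySem.Int.mod
            (PySem.List.pyGetD ((List.range (l.length - N + 1)).map (fun j => pvW l N j % pvDiv)) j 0 *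
             PySem.List.pyGetD l (j + ((N : Int) + 1) - 1) 0) pvDiv)
        = (List.range (l.length - (N + 1) + 1)).map (fun j => pvW l (N + 1) j % pvDiv) := by
      rw [hcnt, PySem.List.pyRange_one, List.map_map]
      have hlen : l.length - (N + 1) + 1 = l.length - N - 1 + 1 := by omega
      rw [← hlen]
      apply List.map_congr_left
      intro kk hkk
      simp only [List.mem_range] at hkk
      simp only [Function.comp]
      have e0 : ((0 : Int) + (kk : Int)) = ((kk : Nat) : Int) := by omega
      rw [e0, PySem.List.pyGetD_natCast]
      have hk1 : kk < l.length - N + 1 := by omega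
      rw [show ((kk : Int) + ((N : Int) + 1) - 1) = ((kk + N : Nat) : Int) by push_cast; ring,
          PySem.List.pyGetD_natCast, PySem.List.getD_map_range _ _ _ _ hk1]
      rw [PySem.Int.mod_eq_emod_of_pos pvDiv_pos]
      rw [show (l.getD (kk + N) 0) = pvGet l (kk + N) from rfl]
      rw [pv_mul_emod_left, ← pvW_succ_right]
    rw [hprods]
    rw [Prod.mk.injEq]
    constructor
    · rw [PySem.Int.mod_eq_emod_of_pos pvDiv_pos,
          pv_sum_map_emod' pvDiv (fun j => pvW l (N + 1) j)]
      show pvSumB l N + pvTermB l (N + 1) = pvSumB l (N + 1)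
      unfold pvSumB
      rw [List.range_succ]
      simp
    · rfl

-- full-evaluation forms of the two programs for n ≥ 2
theorem bench_num_eq (l : List Int) (n : Int) (h2 : 2 ≤ n) (hlen : n ≤ (l.length : Int) + 1)
    (hz : ∀ j, j < l.length - 1 → pvGet l j ≠ 0) :
    bench_num l n = pvSumA l (n - 1).toNat := by
  have hn : ((((n - 1).toNat : Nat) : Int) + 1) = n := by omega
  have h := bench_num_outer l hz (n - 1).toNat (by omega)
  rw [hn] at h
  unfold bench_num
  rw [h]

theorem bench_num_alt_eq (l : List Int) (n : Int) (h2 : 2 ≤ n) (hlen : n ≤ (l.length : Int) + 1) :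
    bench_num_alt l n = pvSumB l (n - 1).toNat := by
  have hn : ((((n - 1).toNat : Nat) : Int) + 1) = n := by omega
  have h := bench_num_alt_outer l (n - 1).toNat (by omega)
  rw [hn] at h
  unfold bench_num_alt
  rw [h]

theorem pvSum_eq_of_lt (l : List Int) (N : Nat) (hN : N < l.length) :
    pvSumA l N = pvSumB l N := by
  unfold pvSumA pvSumB
  apply congrArg
  apply List.map_congr_left
  intro t ht
  simp only [List.mem_range] at ht
  unfold pvTermA
  rw [if_neg (by omega)]

theorem pvSum_split (l : List Int) (hl : 1 ≤ l.length) :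
    pvSumA l l.length = pvSumB l (l.length - 1) + pvW l l.length 0 ∧
    pvSumB l l.length = pvSumB l (l.length - 1) + pvW l l.length 0 % pvDiv := by
  have hrs : List.range l.length = List.range (l.length - 1) ++ [l.length - 1] := by
    rw [← List.range_succ]; congr 1; omega
  constructor
  · unfold pvSumA
    rw [hrs]
    simp only [List.map_append, List.sum_append, List.map_cons, List.map_nil, List.sum_cons,
      List.sum_nil, add_zero]
    congr 1
    · rw [← pvSum_eq_of_lt l (l.length - 1) (by omega)]
      rfl
    · unfold pvTermA
      rw [if_pos (by omega)]
      congr 1; omega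
  · unfold pvSumB
    rw [hrs]
    simp only [List.map_append, List.sum_append, List.map_cons, List.map_nil, List.sum_cons,
      List.sum_nil, add_zero]
    congr 1
    unfold pvTermB pvS
    rw [show l.length - 1 + 1 = l.length by omega,
        show l.length - l.length + 1 = 1 by omega]
    simp

theorem pre_zeros (l : List Int) (hp : ∀ x ∈ l.dropLast, x ≠ 0) :
    ∀ j, j < l.length - 1 → pvGet l j ≠ 0 := by
  intro j hj
  have hjl : j < l.dropLast.length := by simp [List.length_dropLast]; omega
  have : pvGet l j = l.dropLast.getD j 0 := by
    unfold pvGet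
    rw [List.getD_eq_getElem?_getD, List.getD_eq_getElem?_getD,
        List.getElem?_eq_getElem hjl, List.getElem?_eq_getElem (by omega)]
    simp [List.getElem_dropLast]
  rw [this, List.getD_eq_getElem?_getD, List.getElem?_eq_getElem hjl]
  exact hp _ (List.getElem_mem hjl)

-- ===== VERDICT (by name: the statement is the Claim_ definition above) =====
theorem bench_num_spec : Claim_unchanged_bench_num := by
  intro benchs n _ hpre hnd
  by_cases h2 : n ≤ 1
  · unfold bench_num bench_num_alt
    rw [PySem.List.pyRange_one_eq_nil (by omega)]
    rfl
  · rcases hpre with h | ⟨hlen, hz⟩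
    · omega
    have hz' := pre_zeros benchs hz
    rw [bench_num_eq benchs n (by omega) hlen hz', bench_num_alt_eq benchs n (by omega) hlen]
    set N := (n - 1).toNat with hN
    by_cases hNlen : N < benchs.length
    · exact pvSum_eq_of_lt benchs N hNlen
    · have hNeq : N = benchs.length := by omega
      have hl1 : 1 ≤ benchs.length := by omega
      have hprod : 0 ≤ benchs.prod ∧ benchs.prod < 1000000007 := by
        by_contra hc
        exact hnd ⟨by omega, by omega, by omega⟩
      obtain ⟨hs1, hs2⟩ := pvSum_split benchs hl1
      rw [hNeq, hs1, hs2, pvW_full]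
      congr 1
      rw [Int.emod_eq_of_lt hprod.1 (by norm_num [pvDiv]; omega)]

theorem bench_num_changed : Claim_changed_bench_num := by
  unfold Claim_changed_bench_num; decide

theorem bench_num_tight : Claim_exact_bench_num := by
  intro benchs n _ hpre hd
  obtain ⟨hn, hl1, hout⟩ := hd
  have hlen : n ≤ (benchs.length : Int) + 1 := by omega
  have h2 : 2 ≤ n := by omega
  rcases hpre with h | ⟨_, hz⟩
  · omega
  have hz' := pre_zeros benchs hz
  rw [bench_num_eq benchs n h2 hlen hz', bench_num_alt_eq benchs n h2 hlen]
  have hNeq : (n - 1).toNat = benchs.length := by omega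
  obtain ⟨hs1, hs2⟩ := pvSum_split benchs hl1
  rw [hNeq, hs1, hs2, pvW_full]
  intro hcontra
  have heq : benchs.prod = benchs.prod % pvDiv := by omega
  have h1 : 0 ≤ benchs.prod % pvDiv := Int.emod_nonneg _ (by norm_num [pvDiv])
  have h2' : benchs.prod % pvDiv < pvDiv := Int.emod_lt_of_pos _ pvDiv_pos
  rcases hout with h | h
  · omega
  · have : pvDiv = 1000000007 := by norm_num [pvDiv]
    omega
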